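-- pv_equiv track=rewrite | github.com/yasufumi-nakata/Pytra | src/toolchain/emit/cpp/emitter/header_builder.py | _brace_delta_ignoring_literals
-- ===== SOURCE A (Python) =====
-- def _brace_delta_ignoring_literals(line: str) -> int:
--     """文字列リテラルやコメント中の `{` `}` を無視して brace 差分を返す。"""
--     depth = 0
--     in_single = False
--     in_double = False
--     escaped = False
--     i = 0
--     while i < len(line):
--         ch = line[i]
--         nxt = line[i + 1] if i + 1 < len(line) else ""
--         if escaped:
--             escaped = False
--             i += 1
--             continue
--         if in_single:
--             if ch == "\\":
--                 escaped = True
--             elif ch == "'":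
--                 in_single = False
--             i += 1
--             continue
--         if in_double:
--             if ch == "\\":
--                 escaped = True
--             elif ch == "\"":
--                 in_double = False
--             i += 1
--             continue
--         if ch == "/" and nxt == "/":
--             break
--         if ch == "/" and nxt == "*":
--             break
--         if ch == "'":
--             in_single = True
--         elif ch == "\"":
--             in_double = True
--         elif ch == "{":
--             depth += 1
--         elif ch == "}":
--             depth -= 1
--         i += 1
--     return depth
-- ===== SOURCE B (Python) =====
-- def _brace_delta_ignoring_literals(line: str) -> int:
--     """Token-consuming rewrite: string literals are skipped whole by a helper,
--     so the main loop carries no in-string/escaped state flags."""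
--     def _skip_literal(i: int, quote: str) -> int:
--         n = len(line)
--         while i < n:
--             c = line[i]
--             if c == "\\":
--                 i += 2
--             elif c == quote:
--                 return i + 1
--             else:
--                 i += 1
--         return i
--
--     depth = 0
--     i = 0
--     n = len(line)
--     while i < n:
--         ch = line[i]
--         if ch == "/" and i + 1 < n and line[i + 1] in "/*":
--             break
--         if ch == "'" or ch == '"':
--             i = _skip_literal(i + 1, ch)
--         else:
--             if ch == "{":
--                 depth += 1
--             elif ch == "}":
--                 depth -= 1
--             i += 1
--     return depth
-- ===== Notes on version B (the rewrite author's own statement) =====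
-- stated objective: simpler
-- what changed: A's single loop carrying in_single/in_double/escaped flags per character is replaced by a stateless main loop that consumes each string literal whole via a helper, so no mode flags survive across iterations.
import Mathlib
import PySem

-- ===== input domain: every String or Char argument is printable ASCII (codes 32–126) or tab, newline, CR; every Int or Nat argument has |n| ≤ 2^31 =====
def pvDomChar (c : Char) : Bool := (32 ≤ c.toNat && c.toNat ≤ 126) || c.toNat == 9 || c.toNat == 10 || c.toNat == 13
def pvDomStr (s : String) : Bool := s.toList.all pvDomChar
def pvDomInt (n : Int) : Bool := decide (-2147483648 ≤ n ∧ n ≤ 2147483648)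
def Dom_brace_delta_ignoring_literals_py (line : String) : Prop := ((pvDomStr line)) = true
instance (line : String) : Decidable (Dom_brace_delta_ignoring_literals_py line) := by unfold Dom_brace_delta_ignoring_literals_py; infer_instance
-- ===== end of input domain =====

-- B replaces A's flag-machine (in_single/in_double/escaped states carried each step) with a
-- helper that consumes a whole string literal at once; objective: simpler, same cost.

-- ===== PORT A =====
-- A's while-loop as structural recursion over the remaining characters; the state
-- (depth, in_single, in_double, escaped) is carried exactly as in the Python.
def pvGoA : List Char → Int → Bool → Bool → Bool → Int
  | [], depth, _, _, _ => depth
  | ch :: rest, depth, ins, ind, esc =>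
    if esc then pvGoA rest depth ins ind false
    else if ins then
      if ch == '\\' then pvGoA rest depth ins ind true
      else if ch == '\'' then pvGoA rest depth false ind esc
      else pvGoA rest depth ins ind esc
    else if ind then
      if ch == '\\' then pvGoA rest depth ins ind true
      else if ch == '"' then pvGoA rest depth ins false esc
      else pvGoA rest depth ins ind esc
    else if ch == '/' && rest.head? == some '/' then depth
    else if ch == '/' && rest.head? == some '*' then depth
    else if ch == '\'' then pvGoA rest depth true ind esc
    else if ch == '"' then pvGoA rest depth ins true esc
    else if ch == '{' then pvGoA rest (depth + 1) ins ind esc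
    else if ch == '}' then pvGoA rest (depth - 1) ins ind esc
    else pvGoA rest depth ins ind esc

def brace_delta_ignoring_literals_py (line : String) : Int :=
  pvGoA line.toList 0 false false false

-- ===== PORT B =====
-- B's _skip_literal: consume characters up to and including the closing quote
-- (a backslash skips two characters); returns the remainder of the line.
def pvSkipLit : List Char → Char → List Char
  | [], _ => []
  | c :: rest, q =>
    if c == '\\' then
      match rest with
      | [] => []
      | _ :: r => pvSkipLit r q
    else if c == q then rest
    else pvSkipLit rest q

-- termination measure for pvGoB (cited in its decreasing_by)
theorem pvSkipLit_length_le (l : List Char) (q : Char) : (pvSkipLit l q).length ≤ l.length := by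
  induction l, q using pvSkipLit.induct with
  | case1 => simp [pvSkipLit]
  | case2 c q h => simp [pvSkipLit, h]
  | case3 c q h head r ih => simp only [pvSkipLit, h, if_true]; simp; omega
  | case4 c rest q h1 h2 => rw [pvSkipLit.eq_def]; simp [h1, h2]
  | case5 c rest q h1 h2 ih => rw [pvSkipLit.eq_def]; simp [h1, h2]; omega

-- B's main loop: no literal-state flags, literals are consumed whole by pvSkipLit.
def pvGoB : List Char → Int → Int
  | [], depth => depth
  | ch :: rest, depth =>
    if ch == '/' && (rest.head? == some '/' || rest.head? == some '*') then depth
    else if ch == '\'' || ch == '"' then pvGoB (pvSkipLit rest ch) depth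
    else if ch == '{' then pvGoB rest (depth + 1)
    else if ch == '}' then pvGoB rest (depth - 1)
    else pvGoB rest depth
termination_by l _ => l.length
decreasing_by
  · exact Nat.lt_succ_of_le (pvSkipLit_length_le rest ch)
  · simp
  · simp
  · simp

def brace_delta_ignoring_literals_py_alt (line : String) : Int :=
  pvGoB line.toList 0

-- ===== PRECONDITION & SPEC =====
def Spec_brace_delta_ignoring_literals_py (line : String) (out : Int) : Prop := out = brace_delta_ignoring_literals_py_alt line
instance (line : String) (out : Int) : Decidable (Spec_brace_delta_ignoring_literals_py line out) := by unfold Spec_brace_delta_ignoring_literals_py; infer_instance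

-- ===== CLAIM (what is proved, stated in full; the proofs are below) =====
def Claim_equal_brace_delta_ignoring_literals_py : Prop := ∀ (line : String), Dom_brace_delta_ignoring_literals_py line → Spec_brace_delta_ignoring_literals_py line (brace_delta_ignoring_literals_py line)

-- ===== LEMMAS AND PROOFS =====

-- A's in_single scanning (not escaped) ends exactly where B's pvSkipLit ends.
theorem pvGoA_single (l : List Char) (q : Char) (d : Int) (hq : q = '\'') :
    pvGoA l d true false false = pvGoA (pvSkipLit l q) d false false false := by
  induction l, q using pvSkipLit.induct with
  | case1 => simp [pvGoA, pvSkipLit]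
  | case2 c q h => simp [pvGoA, pvSkipLit, h]
  | case3 c q h head r ih =>
    simp only [pvSkipLit, h, if_true]
    have hA : pvGoA (c :: head :: r) d true false false = pvGoA r d true false false := by
      simp [pvGoA, h]
    rw [hA, ih hq]
  | case4 c rest q h1 h2 =>
    subst hq
    have hc : c = '\'' := by simpa using h2
    subst hc
    rw [pvSkipLit.eq_def]
    simp [pvGoA, h1]
  | case5 c rest q h1 h2 ih =>
    subst hq
    rw [pvSkipLit.eq_def]
    simp only [h1, h2, if_false, Bool.false_eq_true]
    have hA : pvGoA (c :: rest) d true false false = pvGoA rest d true false false := by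
      simp [pvGoA, h1, h2]
    rw [hA, ih rfl]

-- A's in_double scanning (not escaped) ends exactly where B's pvSkipLit ends.
theorem pvGoA_double (l : List Char) (q : Char) (d : Int) (hq : q = '"') :
    pvGoA l d false true false = pvGoA (pvSkipLit l q) d false false false := by
  induction l, q using pvSkipLit.induct with
  | case1 => simp [pvGoA, pvSkipLit]
  | case2 c q h => simp [pvGoA, pvSkipLit, h]
  | case3 c q h head r ih =>
    simp only [pvSkipLit, h, if_true]
    have hA : pvGoA (c :: head :: r) d false true false = pvGoA r d false true false := by
      simp [pvGoA, h]
    rw [hA, ih hq]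
  | case4 c rest q h1 h2 =>
    subst hq
    have hc : c = '"' := by simpa using h2
    subst hc
    rw [pvSkipLit.eq_def]
    simp [pvGoA, h1]
  | case5 c rest q h1 h2 ih =>
    subst hq
    rw [pvSkipLit.eq_def]
    simp only [h1, h2, if_false, Bool.false_eq_true]
    have hA : pvGoA (c :: rest) d false true false = pvGoA rest d false true false := by
      simp [pvGoA, h1, h2]
    rw [hA, ih rfl]

-- In the neutral state A's scan computes exactly B's scan.
theorem pvGoA_eq_pvGoB (l : List Char) (d : Int) :
    pvGoA l d false false false = pvGoB l d := by
  induction l, d using pvGoB.induct with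
  | case1 d => simp [pvGoA, pvGoB]
  | case2 ch rest d hcmt =>
    rw [Bool.and_eq_true] at hcmt
    obtain ⟨hc, hn⟩ := hcmt
    have hch : ch = '/' := by simpa using hc
    subst hch
    rw [Bool.or_eq_true] at hn
    rw [pvGoB.eq_def]
    rcases hn with hn | hn <;> simp [pvGoA, hn]
  | case3 ch rest d hcmt hq ih =>
    rw [pvGoB.eq_def]
    simp only [hcmt, hq, if_true, Bool.false_eq_true, if_false]
    rw [Bool.or_eq_true] at hq
    rcases hq with hq | hq
    · have hch : ch = '\'' := by simpa using hq
      subst hch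
      have hA : pvGoA ('\'' :: rest) d false false false = pvGoA rest d true false false := by
        simp [pvGoA]
      rw [hA, pvGoA_single rest '\'' d rfl, ih]
    · have hch : ch = '"' := by simpa using hq
      subst hch
      have hA : pvGoA ('"' :: rest) d false false false = pvGoA rest d false true false := by
        simp [pvGoA]
      rw [hA, pvGoA_double rest '"' d rfl, ih]
  | case4 ch rest d hcmt hq hob ih =>
    have hch : ch = '{' := by simpa using hob
    subst hch
    rw [pvGoB.eq_def]
    simp only [hcmt, hq, Bool.false_eq_true, if_false, if_true, beq_self_eq_true]
    have hA : pvGoA ('{' :: rest) d false false false = pvGoA rest (d + 1) false false false := by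
      simp only [pvGoA]
      simp [show ¬(('{' : Char) == '/') = true by decide,
            show ¬(('{' : Char) == '\'') = true by decide,
            show ¬(('{' : Char) == '"') = true by decide]
    rw [hA, ih]
  | case5 ch rest d hcmt hq hob hcb ih =>
    have hch : ch = '}' := by simpa using hcb
    subst hch
    rw [pvGoB.eq_def]
    simp only [hcmt, hq, hob, Bool.false_eq_true, if_false, if_true, beq_self_eq_true]
    have hA : pvGoA ('}' :: rest) d false false false = pvGoA rest (d - 1) false false false := by
      simp only [pvGoA]
      simp [show ¬(('}' : Char) == '/') = true by decide,
            show ¬(('}' : Char) == '\'') = true by decide,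
            show ¬(('}' : Char) == '"') = true by decide,
            show ¬(('}' : Char) == '{') = true by decide]
    rw [hA, ih]
  | case6 ch rest d hcmt hq hob hcb ih =>
    rw [pvGoB.eq_def]
    simp only [hcmt, hq, hob, hcb, Bool.false_eq_true, if_false]
    have hq1 : ¬(ch == '\'') = true := fun h => hq (by simp [h])
    have hq2 : ¬(ch == '"') = true := fun h => hq (by simp [h])
    have hA : pvGoA (ch :: rest) d false false false = pvGoA rest d false false false := by
      by_cases hsl : (ch == '/') = true
      · have h1 : ¬(rest.head? == some '/') = true := fun h => hcmt (by simp [hsl, h])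
        have h2 : ¬(rest.head? == some '*') = true := fun h => hcmt (by simp [hsl, h])
        simp [pvGoA, hsl, h1, h2, hq1, hq2, hob, hcb]
      · simp [pvGoA, hsl, hq1, hq2, hob, hcb]
    rw [hA, ih]

-- ===== VERDICT (by name: the statement is the Claim_ definition above) =====
theorem brace_delta_ignoring_literals_py_spec : Claim_equal_brace_delta_ignoring_literals_py := by
  intro line _
  unfold Spec_brace_delta_ignoring_literals_py brace_delta_ignoring_literals_py brace_delta_ignoring_literals_py_alt
  exact pvGoA_eq_pvGoB line.toList 0
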